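-- pv_equiv track=rewrite | github.com/hyeok55/algorithm | 카드뭉치.py | solution
-- ===== SOURCE A (Python) =====
-- def solution(cards1, cards2, goal):
--
--     ans_one = []
--     ans_two = []
--
--
--
--     for word in goal:
--         if word in cards1:
--             ans_one.append(word)
--
--         if word in cards2:
--             ans_two.append(word)
--
--     a = len(ans_one)
--     b = len(ans_two)
--     # 카드뭉치의 단어를 다 쓸 필요가 없음
--     if ans_one == cards1[:a] and ans_two == cards2[:b]:
--         return "Yes"
--     else:
--         return "No"
-- ===== SOURCE B (Python) =====
-- def solution(cards1, cards2, goal):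
--     i = j = 0
--     ok1 = ok2 = True
--     for word in goal:
--         if word in cards1:
--             if i < len(cards1) and cards1[i] == word:
--                 i += 1
--             else:
--                 ok1 = False
--         if word in cards2:
--             if j < len(cards2) and cards2[j] == word:
--                 j += 1
--             else:
--                 ok2 = False
--     return "Yes" if ok1 and ok2 else "No"
-- ===== Notes on version B (the rewrite author's own statement) =====
-- stated objective: alternative
-- what changed: Instead of materialising the two filtered lists and comparing them to slices of the card lists afterwards, B does a single pass over goal maintaining two prefix indices and two sticky boolean flags, allocating no intermediate lists.
import Mathlib
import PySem

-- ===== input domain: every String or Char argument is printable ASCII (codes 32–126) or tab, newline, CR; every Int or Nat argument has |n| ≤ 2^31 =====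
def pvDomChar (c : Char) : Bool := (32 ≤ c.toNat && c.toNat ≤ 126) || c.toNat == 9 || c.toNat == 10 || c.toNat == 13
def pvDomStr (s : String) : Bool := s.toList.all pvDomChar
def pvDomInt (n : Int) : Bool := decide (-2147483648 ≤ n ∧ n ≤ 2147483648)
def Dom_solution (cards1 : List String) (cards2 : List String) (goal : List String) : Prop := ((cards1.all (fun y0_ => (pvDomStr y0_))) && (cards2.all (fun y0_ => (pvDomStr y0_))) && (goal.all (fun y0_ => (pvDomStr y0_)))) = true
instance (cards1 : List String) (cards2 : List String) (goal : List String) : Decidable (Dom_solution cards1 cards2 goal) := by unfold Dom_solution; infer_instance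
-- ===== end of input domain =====

-- B replaces the filtered-lists-plus-slice-comparison of A by a single pass with two
-- prefix indices and sticky failure flags (objective: alternative decomposition).

-- ===== PORT A =====
def solution (cards1 : List String) (cards2 : List String) (goal : List String) : String :=
  let st := goal.foldl
    (fun (st : List String × List String) word =>
      let st := if word ∈ cards1 then (st.1 ++ [word], st.2) else st
      if word ∈ cards2 then (st.1, st.2 ++ [word]) else st)
    ([], [])
  let a : Int := st.1.length
  let b : Int := st.2.length
  if st.1 = PySem.List.slice cards1 none (some a) ∧ st.2 = PySem.List.slice cards2 none (some b)
  then "Yes" else "No"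

-- ===== PORT B =====
def solution_alt (cards1 : List String) (cards2 : List String) (goal : List String) : String :=
  let st := goal.foldl
    (fun (st : Nat × Nat × Bool × Bool) word =>
      let (i, j, ok1, ok2) := st
      let p1 := if word ∈ cards1 then
          (if cards1[i]? = some word then (i + 1, ok1) else (i, false))
        else (i, ok1)
      let p2 := if word ∈ cards2 then
          (if cards2[j]? = some word then (j + 1, ok2) else (j, false))
        else (j, ok2)
      (p1.1, p2.1, p1.2, p2.2))
    (0, 0, true, true)
  if st.2.2.1 ∧ st.2.2.2 then "Yes" else "No"

-- ===== PRECONDITION & SPEC =====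
def Spec_solution (cards1 : List String) (cards2 : List String) (goal : List String) (out : String) : Prop := out = solution_alt cards1 cards2 goal
instance (cards1 : List String) (cards2 : List String) (goal : List String) (out : String) : Decidable (Spec_solution cards1 cards2 goal out) := by unfold Spec_solution; infer_instance

-- ===== CLAIM (what is proved, stated in full; the proofs are below) =====
def Claim_equal_solution : Prop := ∀ (cards1 : List String) (cards2 : List String) (goal : List String), Dom_solution cards1 cards2 goal → Spec_solution cards1 cards2 goal (solution cards1 cards2 goal)

-- ===== LEMMAS AND PROOFS =====

-- one side of B's loop, run on its own
def sideB (cards : List String) (ws : List String) (i : Nat) (ok : Bool) : Nat × Bool :=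
  ws.foldl
    (fun (s : Nat × Bool) w =>
      if w ∈ cards then
        (if cards[s.1]? = some w then (s.1 + 1, s.2) else (s.1, false))
      else s)
    (i, ok)

theorem sideB_nil (cards : List String) (i : Nat) (ok : Bool) :
    sideB cards [] i ok = (i, ok) := rfl

theorem sideB_cons (cards : List String) (w : String) (ws : List String) (i : Nat) (ok : Bool) :
    sideB cards (w :: ws) i ok =
      if w ∈ cards then
        (if cards[i]? = some w then sideB cards ws (i + 1) ok else sideB cards ws i false)
      else sideB cards ws i ok := by
  simp only [sideB, List.foldl_cons]
  split_ifs <;> rfl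

-- once the flag is false it stays false
theorem sideB_false (cards : List String) (ws : List String) :
    ∀ i, (sideB cards ws i false).2 = false := by
  induction ws with
  | nil => intro i; rfl
  | cons w ws ih =>
      intro i
      rw [sideB_cons]
      split_ifs <;> simp [ih]

-- B's pair fold is the two independent side loops
theorem foldB_eq (cards1 cards2 : List String) (ws : List String) :
    ∀ i j ok1 ok2,
      ws.foldl
        (fun (st : Nat × Nat × Bool × Bool) word =>
          let (i, j, ok1, ok2) := st
          let p1 := if word ∈ cards1 then
              (if cards1[i]? = some word then (i + 1, ok1) else (i, false))
            else (i, ok1)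
          let p2 := if word ∈ cards2 then
              (if cards2[j]? = some word then (j + 1, ok2) else (j, false))
            else (j, ok2)
          (p1.1, p2.1, p1.2, p2.2))
        (i, j, ok1, ok2)
      = ((sideB cards1 ws i ok1).1, (sideB cards2 ws j ok2).1,
         (sideB cards1 ws i ok1).2, (sideB cards2 ws j ok2).2) := by
  induction ws with
  | nil => intro i j ok1 ok2; rfl
  | cons w ws ih =>
      intro i j ok1 ok2
      rw [List.foldl_cons, sideB_cons, sideB_cons]
      split_ifs <;> simp [*]

-- A's pair fold is the two filters
theorem foldA_eq (cards1 cards2 : List String) (ws : List String) :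
    ∀ a1 a2 : List String,
      ws.foldl
        (fun (st : List String × List String) word =>
          let st := if word ∈ cards1 then (st.1 ++ [word], st.2) else st
          if word ∈ cards2 then (st.1, st.2 ++ [word]) else st)
        (a1, a2)
      = (a1 ++ ws.filter (fun w => decide (w ∈ cards1)),
         a2 ++ ws.filter (fun w => decide (w ∈ cards2))) := by
  induction ws with
  | nil => intro a1 a2; simp
  | cons w ws ih =>
      intro a1 a2
      rw [List.foldl_cons]
      by_cases h1 : w ∈ cards1 <;> by_cases h2 : w ∈ cards2 <;>
        simp [h1, h2, ih]

-- the heart: B's flag is true iff the filtered list matches the cards from index i on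
theorem sideB_key (cards : List String) (ws : List String) :
    ∀ i, ((sideB cards ws i true).2 = true) ↔
      (ws.filter (fun w => decide (w ∈ cards))
        = (cards.drop i).take (ws.filter (fun w => decide (w ∈ cards))).length) := by
  induction ws with
  | nil => intro i; simp [sideB_nil]
  | cons w ws ih =>
      intro i
      rw [sideB_cons]
      by_cases hw : w ∈ cards
      · rw [if_pos hw]
        simp only [List.filter_cons, hw, decide_true, if_true]
        by_cases hlt : i < cards.length
        · have h : cards[i]? = some cards[i] := List.getElem?_eq_getElem hlt
          by_cases hwc : cards[i] = w
          · have hsome : cards[i]? = some w := by rw [h, hwc]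
            rw [if_pos hsome, ih (i + 1), List.drop_eq_getElem_cons hlt, hwc]
            simp [List.length_cons, List.take_succ_cons]
          · have hne : ¬ (cards[i]? = some w) := by simp [h, hwc]
            rw [if_neg hne, List.drop_eq_getElem_cons hlt]
            simp only [sideB_false, Bool.false_eq_true, false_iff, List.length_cons,
              List.take_succ_cons, List.cons.injEq, not_and]
            exact fun h2 => absurd h2.symm hwc
        · -- out of bounds: flag goes false; drop i = [] so take is []
          have h : cards[i]? = none := List.getElem?_eq_none (by omega)
          have hdrop : cards.drop i = [] := List.drop_eq_nil_of_le (by omega)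
          rw [if_neg (by simp [h])]
          simp [sideB_false, hdrop]
      · simp [hw, ih i]

-- ===== VERDICT (by name: the statement is the Claim_ definition above) =====
theorem solution_spec : Claim_equal_solution := by
  intro cards1 cards2 goal _
  show solution cards1 cards2 goal = solution_alt cards1 cards2 goal
  unfold solution solution_alt
  rw [foldA_eq, foldB_eq]
  have h1 := sideB_key cards1 goal 0
  have h2 := sideB_key cards2 goal 0
  simp only [List.drop_zero] at h1 h2
  simp only [PySem.List.slice_to_natCast]
  by_cases b1 : (sideB cards1 goal 0 true).2 = true <;>
    by_cases b2 : (sideB cards2 goal 0 true).2 = true <;>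
      simp [b1, b2, ← h1, ← h2]
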